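-- pv_equiv track=rewrite | github.com/ccollado7/UNSAM---Python | 11. Ordenamiento/11.1 Ordenamientos sencillos de listas/Ejercicio_11.5/ejercicio_11.5.py | buscar_max
-- ===== SOURCE A (Python) =====
-- def buscar_max(lista, a, b):
--     """Devuelve la posición del máximo elemento en un segmento de
--        lista de elementos comparables.
--        La lista no debe ser vacía.
--        a y b son las posiciones inicial y final del segmento"""
--     comparaciones = 0
--     pos_max = a
--     for i in range(a + 1, b + 1):
--         comparaciones += 1
--         if lista[i] > lista[pos_max]:
--             pos_max = i
--     return pos_max,comparaciones
-- ===== SOURCE B (Python) =====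
-- def buscar_max(lista, a, b):
--     """Divide-and-conquer: posicion del primer maximo en lista[a..b] y
--        cantidad de comparaciones (b - a cuando a < b, si no 0)."""
--     if b <= a:
--         return a, 0
--     m = (a + b) // 2
--     pos_i, ci = buscar_max(lista, a, m)
--     pos_d, cd = buscar_max(lista, m + 1, b)
--     pos = pos_d if lista[pos_d] > lista[pos_i] else pos_i
--     return pos, ci + cd + 1
-- ===== Notes on version B (the rewrite author's own statement) =====
-- stated objective: alternative
-- what changed: Replaces the linear left-to-right scan carrying a running argmax with a recursive divide-and-conquer that splits the segment at the midpoint, solves both halves, and merges with one strict comparison (same b-a comparison count, earliest index kept on ties).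
import Mathlib
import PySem

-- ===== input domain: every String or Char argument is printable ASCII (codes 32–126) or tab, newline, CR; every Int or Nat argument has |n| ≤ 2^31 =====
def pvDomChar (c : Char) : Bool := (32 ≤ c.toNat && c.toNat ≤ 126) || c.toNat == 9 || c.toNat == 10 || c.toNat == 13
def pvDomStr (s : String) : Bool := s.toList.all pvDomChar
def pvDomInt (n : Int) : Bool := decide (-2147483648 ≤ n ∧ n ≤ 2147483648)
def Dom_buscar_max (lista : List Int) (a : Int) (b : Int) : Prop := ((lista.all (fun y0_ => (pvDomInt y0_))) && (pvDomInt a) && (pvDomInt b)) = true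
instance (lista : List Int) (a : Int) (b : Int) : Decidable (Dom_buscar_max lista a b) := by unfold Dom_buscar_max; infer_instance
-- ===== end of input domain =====

-- B replaces A's linear scan by a divide-and-conquer over the segment (alternative decomposition, same cost).


-- ===== PORT A =====
def buscar_max (lista : List Int) (a : Int) (b : Int) : Int × Int :=
  (PySem.List.pyRange (a + 1) (b + 1) 1).foldl
    (fun st i =>
      let c := st.2 + 1
      if PySem.List.pyGetD lista i 0 > PySem.List.pyGetD lista st.1 0 then (i, c) else (st.1, c))
    (a, 0)

-- ===== PORT B =====
def buscar_max_alt (lista : List Int) (a : Int) (b : Int) : Int × Int :=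
  if h : b ≤ a then (a, 0)
  else
    let m := PySem.Int.floordiv (a + b) 2
    let l := buscar_max_alt lista a m
    let r := buscar_max_alt lista (m + 1) b
    ((if PySem.List.pyGetD lista r.1 0 > PySem.List.pyGetD lista l.1 0 then r.1 else l.1),
     l.2 + r.2 + 1)
termination_by (b - a).toNat
decreasing_by
  all_goals
    simp only [PySem.Int.floordiv_eq_ediv_of_pos (by omega : (0:Int) < 2)]
    omega

-- ===== PRECONDITION & SPEC =====
-- Pre_ excludes exactly the inputs where A raises IndexError: a < b with some accessed
-- index a..b outside Python's valid (negative-wrapping) range; when b ≤ a no index is read.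
def Pre_buscar_max (lista : List Int) (a : Int) (b : Int) : Prop :=
  b ≤ a ∨ (-(lista.length : Int) ≤ a ∧ b < (lista.length : Int))
instance (lista : List Int) (a : Int) (b : Int) : Decidable (Pre_buscar_max lista a b) := by
  unfold Pre_buscar_max; infer_instance

def pvWitness_buscar_max : List Int × Int × Int := ([3, 1, 4, 1, 5], 0, 4)

def Spec_buscar_max (lista : List Int) (a : Int) (b : Int) (out : Int × Int) : Prop := out = buscar_max_alt lista a b
instance (lista : List Int) (a : Int) (b : Int) (out : Int × Int) : Decidable (Spec_buscar_max lista a b out) := by unfold Spec_buscar_max; infer_instance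

-- ===== CLAIM (what is proved, stated in full; the proofs are below) =====
def Claim_equal_buscar_max : Prop := ∀ (lista : List Int) (a : Int) (b : Int), Dom_buscar_max lista a b → Pre_buscar_max lista a b → Spec_buscar_max lista a b (buscar_max lista a b)

-- ===== LEMMAS AND PROOFS =====

-- running first-argmax of A's scan, with the position only
def pvPmax (g : Int → Int) (p : Int) (l : List Int) : Int :=
  l.foldl (fun p i => if g i > g p then i else p) p

-- A's fold = (pvPmax, count)
theorem pvFold_eq (g : Int → Int) :
    ∀ (l : List Int) (p c : Int),
      l.foldl (fun st i =>
          let cc := st.2 + 1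
          if g i > g st.1 then (i, cc) else (st.1, cc)) (p, c)
        = (pvPmax g p l, c + (l.length : Int)) := by
  intro l
  induction l with
  | nil => intro p c; simp [pvPmax]
  | cons j t ih =>
    intro p c
    simp only [List.foldl_cons, pvPmax, List.length_cons]
    by_cases h : g j > g p <;> simp [h, ih, pvPmax] <;> ring

-- the running candidate never decreases in g-value
theorem pvPmax_ge (g : Int → Int) :
    ∀ (l : List Int) (p : Int), g p ≤ g (pvPmax g p l) := by
  intro l
  induction l with
  | nil => intro p; simp [pvPmax]
  | cons j t ih =>
    intro p
    have h1 : pvPmax g p (j :: t) = pvPmax g (if g j > g p then j else p) t := by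
      simp [pvPmax]
    rw [h1]
    by_cases h : g j > g p
    · simp only [h, if_pos]
      exact le_trans (le_of_lt h) (ih j)
    · simp only [h, if_neg, not_false_iff]
      exact ih p

-- external-candidate lemma: scanning j::l with candidate p = merging p with the
-- segment's own first-argmax by one strict comparison
theorem pvPmax_cons_merge (g : Int → Int) :
    ∀ (l : List Int) (p j : Int),
      pvPmax g p (j :: l) = (if g (pvPmax g j l) > g p then pvPmax g j l else p) := by
  intro l
  induction l with
  | nil => intro p j; simp [pvPmax]
  | cons k t ih =>
    intro p j
    have h1 : pvPmax g p (j :: k :: t) = pvPmax g (if g j > g p then j else p) (k :: t) := by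
      simp [pvPmax]
    rw [h1, ih _ k, ih j k]
    have hkt := pvPmax_ge g t k
    split_ifs <;> first | rfl | omega

-- the main equivalence, by strong induction on segment length
theorem pvMain (lista : List Int) :
    ∀ (n : Nat) (a b : Int), (b - a).toNat ≤ n →
      buscar_max lista a b = buscar_max_alt lista a b := by
  intro n
  induction n with
  | zero =>
    intro a b hn
    have hba : b ≤ a := by omega
    rw [buscar_max_alt]
    simp [buscar_max, hba, PySem.List.pyRange_one_eq_nil (by omega : b + 1 ≤ a + 1)]
  | succ n ih =>
    intro a b hn
    by_cases hba : b ≤ a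
    · rw [buscar_max_alt]
      simp [buscar_max, hba, PySem.List.pyRange_one_eq_nil (by omega : b + 1 ≤ a + 1)]
    · have hab : a < b := by omega
      set m := PySem.Int.floordiv (a + b) 2 with hm
      have hmb : a ≤ m ∧ m < b := by
        rw [hm, PySem.Int.floordiv_eq_ediv_of_pos (by omega : (0:Int) < 2)]
        omega
      rw [buscar_max_alt]
      simp only [hba, dite_false, ← hm]
      rw [← ih a m (by omega), ← ih (m + 1) b (by omega)]
      have hsplit : PySem.List.pyRange (a + 1) (b + 1) 1
          = PySem.List.pyRange (a + 1) (m + 1) 1 ++ PySem.List.pyRange (m + 1) (b + 1) 1 :=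
        PySem.List.pyRange_one_append _ _ _ (by omega) (by omega)
      have hcons : PySem.List.pyRange (m + 1) (b + 1) 1
          = (m + 1) :: PySem.List.pyRange (m + 2) (b + 1) 1 := by
        rw [PySem.List.pyRange_one_cons (by omega : m + 1 < b + 1),
            show m + 1 + 1 = m + 2 from by ring]
      have eA : buscar_max lista a b
          = (pvPmax (fun i => PySem.List.pyGetD lista i 0) a (PySem.List.pyRange (a + 1) (b + 1) 1),
             0 + (((b + 1) - (a + 1)).toNat : Int)) := by
        rw [buscar_max, pvFold_eq (fun i => PySem.List.pyGetD lista i 0), PySem.List.length_pyRange_one]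
      have eL : buscar_max lista a m
          = (pvPmax (fun i => PySem.List.pyGetD lista i 0) a (PySem.List.pyRange (a + 1) (m + 1) 1),
             0 + (((m + 1) - (a + 1)).toNat : Int)) := by
        rw [buscar_max, pvFold_eq (fun i => PySem.List.pyGetD lista i 0), PySem.List.length_pyRange_one]
      have eR : buscar_max lista (m + 1) b
          = (pvPmax (fun i => PySem.List.pyGetD lista i 0) (m + 1) (PySem.List.pyRange (m + 2) (b + 1) 1),
             0 + (((b + 1) - (m + 2)).toNat : Int)) := by
        rw [buscar_max, pvFold_eq (fun i => PySem.List.pyGetD lista i 0), PySem.List.length_pyRange_one,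
            show m + 1 + 1 = m + 2 from by ring]
      rw [eA, eL, eR, hsplit, hcons]
      have hfoldapp : pvPmax (fun i => PySem.List.pyGetD lista i 0) a
            (PySem.List.pyRange (a + 1) (m + 1) 1 ++ ((m + 1) :: PySem.List.pyRange (m + 2) (b + 1) 1))
          = pvPmax (fun i => PySem.List.pyGetD lista i 0)
              (pvPmax (fun i => PySem.List.pyGetD lista i 0) a (PySem.List.pyRange (a + 1) (m + 1) 1))
              ((m + 1) :: PySem.List.pyRange (m + 2) (b + 1) 1) := by
        simp [pvPmax]
      rw [hfoldapp, pvPmax_cons_merge (fun i => PySem.List.pyGetD lista i 0)]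
      dsimp only
      rw [Prod.mk.injEq]
      exact ⟨rfl, by omega⟩

-- ===== VERDICT (by name: the statement is the Claim_ definition above) =====
theorem buscar_max_spec : Claim_equal_buscar_max := by
  intro lista a b _ _
  unfold Spec_buscar_max
  exact pvMain lista (b - a).toNat a b le_rfl
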